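-- pv_equiv track=rewrite | github.com/yangjing6688/framework | ExtremeAutomation/Library/Device/Common/Agents/ExtjsSeleniumAgent.py | split_css_selector
-- ===== SOURCE A (Python) =====
-- def split_css_selector(css_selector):
--     """
--     This function will return a list of each CSS selector in a given css selector string.
--
--     For example:
--         This string ".x-grid-item:nth-of-type(2) .x-grid-cell-inner:textEquals(AC Power Recovered)"
--         would return [".x-grid-item:nth-of-type(2)", ".x-grid-cell-inner:textEquals(AC Power Recovered)"]
--     """
--     norm_css_selector = css_selector.strip()
--     split_selector = []
--     current_str = ""
--     num_parens = 0
--     for index, char in enumerate(norm_css_selector):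
--         if char == " ":
--             if num_parens == 0:
--                 split_selector.append(current_str)
--                 current_str = ""
--             else:
--                 current_str += char
--         else:
--             if char == "(":
--                 num_parens += 1
--             elif char == ")":
--                 num_parens -= 1
--             current_str += char
--
--         if index == len(norm_css_selector) - 1:
--             split_selector.append(current_str)
--
--     return split_selector
-- ===== SOURCE B (Python) =====
-- def split_css_selector(css_selector):
--     norm = css_selector.strip()
--     if not norm:
--         return []
--     result = []
--     buffer = []
--     depth = 0
--     for tok in norm.split(' '):
--         depth += tok.count('(') - tok.count(')')
--         buffer.append(tok)
--         if depth == 0: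
--             result.append(' '.join(buffer))
--             buffer = []
--     if buffer:
--         result.append(' '.join(buffer))
--     return result
-- ===== Notes on version B (the rewrite author's own statement) =====
-- stated objective: faster
-- what changed: B replaces A's character-by-character scan (enumerate index, growing current string) with one str.split on single spaces followed by a token-level pass regrouping tokens via a running paren depth computed from per-token counts.
import Mathlib
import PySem

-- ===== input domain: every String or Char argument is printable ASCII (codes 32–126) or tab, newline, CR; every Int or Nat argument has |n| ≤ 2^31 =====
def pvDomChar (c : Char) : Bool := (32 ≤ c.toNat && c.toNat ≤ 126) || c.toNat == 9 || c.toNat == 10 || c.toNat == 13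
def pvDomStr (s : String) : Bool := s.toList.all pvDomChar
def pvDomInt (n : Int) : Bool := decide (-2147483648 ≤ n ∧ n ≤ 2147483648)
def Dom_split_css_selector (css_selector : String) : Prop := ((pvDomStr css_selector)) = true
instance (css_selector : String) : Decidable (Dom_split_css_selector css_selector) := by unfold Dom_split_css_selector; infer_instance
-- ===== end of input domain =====

-- B splits the stripped selector with str.split once and regroups the tokens by a running
-- parenthesis depth from per-token counts, replacing A's character-by-character scan (faster by a constant factor: the per-character work moves into C-level built-ins).

-- ===== PORT A =====
-- A's loop body: state (split_selector, current_str, num_parens); n = len(norm);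
-- the trailing 'if index == len(norm) - 1' append is part of the step.
def pvStepA (n : Int) (s : List String × List Char × Int) (ic : Int × Char) :
    List String × List Char × Int :=
  let s' :=
    if ic.2 = ' ' then
      if s.2.2 = 0 then (s.1 ++ [String.ofList s.2.1], ([] : List Char), s.2.2)
      else (s.1, s.2.1 ++ [' '], s.2.2)
    else
      let np := if ic.2 = '(' then s.2.2 + 1 else if ic.2 = ')' then s.2.2 - 1 else s.2.2
      (s.1, s.2.1 ++ [ic.2], np)
  if ic.1 = n - 1 then (s'.1 ++ [String.ofList s'.2.1], s'.2.1, s'.2.2) else s'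

def split_css_selector (css_selector : String) : List String :=
  let norm := PySem.Str.strip css_selector
  let st := (PySem.List.enumerate norm.toList).foldl (pvStepA (PySem.Str.len norm)) ([], [], 0)
  st.1

-- ===== PORT B =====
-- B's loop body: state (result, buffer, depth); one step per token of norm.split(' ').
def pvStepB (s : List String × List (List Char) × Int) (tok : List Char) :
    List String × List (List Char) × Int :=
  let depth := s.2.2 + (PySem.Chars.count tok ['('] : Int) - (PySem.Chars.count tok [')'] : Int)
  let buf := s.2.1 ++ [tok]
  if depth = 0 then (s.1 ++ [String.ofList (PySem.Chars.join [' '] buf)], [], depth)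
  else (s.1, buf, depth)

def split_css_selector_alt (css_selector : String) : List String :=
  let norm := PySem.Str.strip css_selector
  if norm = "" then []
  else
    let fin := (PySem.Chars.splitOn norm.toList [' ']).foldl pvStepB ([], [], 0)
    fin.1 ++ (if fin.2.1 = [] then [] else [String.ofList (PySem.Chars.join [' '] fin.2.1)])

-- ===== PRECONDITION & SPEC =====
def Spec_split_css_selector (css_selector : String) (out : List String) : Prop := out = split_css_selector_alt css_selector
instance (css_selector : String) (out : List String) : Decidable (Spec_split_css_selector css_selector out) := by unfold Spec_split_css_selector; infer_instance

-- ===== CLAIM (what is proved, stated in full; the proofs are below) =====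
def Claim_equal_split_css_selector : Prop := ∀ (css_selector : String), Dom_split_css_selector css_selector → Spec_split_css_selector css_selector (split_css_selector css_selector)

-- ===== LEMMAS AND PROOFS =====

-- plain character step of A's loop, without the last-index append
def chStep (s : List String × List Char × Int) (c : Char) : List String × List Char × Int :=
  if c = ' ' then
    if s.2.2 = 0 then (s.1 ++ [String.ofList s.2.1], ([] : List Char), s.2.2)
    else (s.1, s.2.1 ++ [' '], s.2.2)
  else
    (s.1, s.2.1 ++ [c], if c = '(' then s.2.2 + 1 else if c = ')' then s.2.2 - 1 else s.2.2)

-- split on a single space, structurally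
def consHead (p : List Char) : List (List Char) → List (List Char)
  | [] => [p]
  | h :: t => (p ++ h) :: t

def split' : List Char → List (List Char)
  | [] => [[]]
  | c :: t => if c = ' ' then [] :: split' t else consHead [c] (split' t)

theorem split'_ne_nil (l : List Char) : split' l ≠ [] := by
  cases l with
  | nil => simp [split']
  | cons c t =>
    simp only [split']
    split
    · simp
    · cases h : split' t <;> simp [consHead]

theorem consHead_assoc (p q : List Char) (L : List (List Char)) :
    consHead p (consHead q L) = consHead (p ++ q) L := by
  cases L <;> simp [consHead]

theorem splitOn_go_eq (fuel : Nat) (l cur : List Char) (acc : List (List Char))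
    (h : l.length ≤ fuel) :
    PySem.Chars.splitOn.go [' '] fuel l cur acc = acc.reverse ++ consHead cur.reverse (split' l) := by
  induction fuel generalizing l cur acc with
  | zero =>
    have : l = [] := by cases l <;> simp_all
    subst this
    simp [PySem.Chars.splitOn.go, split', consHead]
  | succ fuel ih =>
    cases l with
    | nil => simp [PySem.Chars.splitOn.go, split', consHead]
    | cons c rest =>
      by_cases hc : c = ' '
      · subst hc
        have hpre : ([' '] : List Char).isPrefixOf (' ' :: rest) = true := by
          simp [List.isPrefixOf]
        rw [show PySem.Chars.splitOn.go [' '] (fuel+1) (' ' :: rest) cur acc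
              = PySem.Chars.splitOn.go [' '] fuel rest [] (cur.reverse :: acc) by
            simp [PySem.Chars.splitOn.go, hpre]]
        rw [ih rest [] (cur.reverse :: acc) (by simpa using Nat.le_of_succ_le_succ (by simpa using h))]
        simp only [split', List.reverse_cons, List.reverse_nil]
        have hne := split'_ne_nil rest
        cases hs : split' rest with
        | nil => exact absurd hs hne
        | cons a b => simp [consHead]
      · have hpre : ([' '] : List Char).isPrefixOf (c :: rest) = false := by
          simp [List.isPrefixOf]
          intro hcc; exact hc hcc.symm
        rw [show PySem.Chars.splitOn.go [' '] (fuel+1) (c :: rest) cur acc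
              = PySem.Chars.splitOn.go [' '] fuel rest (c :: cur) acc by
            simp [PySem.Chars.splitOn.go, hpre]]
        rw [ih rest (c :: cur) acc (by simpa using Nat.le_of_succ_le_succ (by simpa using h))]
        simp only [split', if_neg hc, List.reverse_cons]
        rw [consHead_assoc]

theorem consHead_nil_eq (L : List (List Char)) (h : L ≠ []) : consHead [] L = L := by
  cases L with
  | nil => exact absurd rfl h
  | cons a b => simp [consHead]

theorem splitOn_eq_split' (l : List Char) : PySem.Chars.splitOn l [' '] = split' l := by
  have h := splitOn_go_eq (l.length + 1) l [] [] (Nat.le_succ _)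
  simp only [List.reverse_nil, List.nil_append] at h
  rw [PySem.Chars.splitOn, h, consHead_nil_eq _ (split'_ne_nil l)]

theorem count_go_eq (c : Char) (fuel : Nat) (l : List Char) (acc : Nat)
    (h : l.length ≤ fuel) :
    PySem.Chars.count.go [c] fuel l acc = acc + l.count c := by
  induction fuel generalizing l acc with
  | zero =>
    have : l = [] := by cases l <;> simp_all
    subst this; simp [PySem.Chars.count.go]
  | succ fuel ih =>
    cases l with
    | nil => simp [PySem.Chars.count.go]
    | cons a rest =>
      have hrest : rest.length ≤ fuel := by simpa using Nat.le_of_succ_le_succ (by simpa using h)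
      by_cases hc : c = a
      · subst hc
        have hpre : ([c] : List Char).isPrefixOf (c :: rest) = true := by simp [List.isPrefixOf]
        rw [show PySem.Chars.count.go [c] (fuel+1) (c :: rest) acc
              = PySem.Chars.count.go [c] fuel rest (acc + 1) by simp [PySem.Chars.count.go, hpre]]
        rw [ih rest (acc + 1) hrest]
        simp
        omega
      · have hpre : ([c] : List Char).isPrefixOf (a :: rest) = false := by
          simp [List.isPrefixOf]; intro hcc; exact hc hcc
        rw [show PySem.Chars.count.go [c] (fuel+1) (a :: rest) acc
              = PySem.Chars.count.go [c] fuel rest acc by simp [PySem.Chars.count.go, hpre]]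
        rw [ih rest acc hrest]
        simp [Ne.symm hc]

theorem count_single (l : List Char) (c : Char) : PySem.Chars.count l [c] = l.count c := by
  simp [PySem.Chars.count, count_go_eq c l.length l 0 (Nat.le_refl _)]

theorem split'_no_space (l : List Char) : ∀ t ∈ split' l, ' ' ∉ t := by
  induction l with
  | nil => intro t ht; simp [split'] at ht; simp [ht]
  | cons c rest ih =>
    intro t ht
    simp only [split'] at ht
    by_cases hc : c = ' '
    · rw [if_pos hc] at ht
      rcases List.mem_cons.mp ht with h | h
      · simp [h]
      · exact ih t h
    · rw [if_neg hc] at ht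
      cases hs : split' rest with
      | nil => exact absurd hs (split'_ne_nil rest)
      | cons a b =>
        rw [hs] at ht
        simp only [consHead] at ht
        rcases List.mem_cons.mp ht with h | h
        · subst h
          intro hmem
          rcases List.mem_cons.mp hmem with h | h
          · exact hc h.symm
          · exact ih a (hs ▸ List.mem_cons_self) h
        · exact ih t (hs ▸ List.mem_cons_of_mem _ h)

theorem inter_cc (x y : List Char) (ys : List (List Char)) :
    ([' '] : List Char).intercalate (x :: y :: ys) = x ++ [' '] ++ ([' '] : List Char).intercalate (y :: ys) := by
  simp [List.intercalate, List.intersperse]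

theorem intercalate_split' (l : List Char) : ([' '] : List Char).intercalate (split' l) = l := by
  induction l with
  | nil => simp [split', List.intercalate]
  | cons c rest ih =>
    simp only [split']
    by_cases hc : c = ' '
    · rw [if_pos hc, hc]
      cases hs : split' rest with
      | nil => exact absurd hs (split'_ne_nil rest)
      | cons a b =>
        rw [hs] at ih
        simp only [inter_cc]
        simp [ih]
    · rw [if_neg hc]
      cases hs : split' rest with
      | nil => exact absurd hs (split'_ne_nil rest)
      | cons a b =>
        rw [hs] at ih
        simp only [consHead]
        cases b with
        | nil => simp_all [List.intercalate]
        | cons x y =>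
          simp only [inter_cc] at ih ⊢
          simp [ih]

-- appending one more part to a non-empty intercalation
theorem intercalate_append_singleton (L : List (List Char)) (t : List Char) (h : L ≠ []) :
    ([' '] : List Char).intercalate (L ++ [t]) = ([' '] : List Char).intercalate L ++ [' '] ++ t := by
  induction L with
  | nil => exact absurd rfl h
  | cons a b ih =>
    cases b with
    | nil => simp [List.intercalate]
    | cons x y =>
      have := ih (by simp)
      simp only [List.cons_append, inter_cc] at this ⊢
      simp [this]

def pref (buf : List (List Char)) : List Char :=
  if buf = [] then [] else ([' '] : List Char).intercalate buf ++ [' ']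

theorem pref_append (buf : List (List Char)) (t : List Char) :
    pref buf ++ t = ([' '] : List Char).intercalate (buf ++ [t]) := by
  by_cases h : buf = []
  · subst h; simp [pref, List.intercalate]
  · simp [pref, if_neg h, intercalate_append_singleton buf t h]

-- processing a space-free token character by character
theorem token_fold (t : List Char) (hns : ' ' ∉ t) (out : List String) (cur : List Char) (d : Int) :
    List.foldl chStep (out, cur, d) t
      = (out, cur ++ t, d + (t.count '(' : Int) - (t.count ')' : Int)) := by
  induction t generalizing cur d with
  | nil => simp
  | cons c rest ih =>
    have hc : c ≠ ' ' := fun h => hns (h ▸ List.mem_cons_self)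
    have hrest : ' ' ∉ rest := fun h => hns (List.mem_cons_of_mem _ h)
    simp only [List.foldl_cons]
    rw [show chStep (out, cur, d) c
          = (out, cur ++ [c], if c = '(' then d + 1 else if c = ')' then d - 1 else d) by
        simp [chStep, hc]]
    rw [ih hrest]
    simp only [List.append_assoc, List.singleton_append, List.count_cons, Prod.mk.injEq]
    refine ⟨trivial, trivial, ?_⟩
    by_cases h1 : c = '('
    · simp [h1]; omega
    · by_cases h2 : c = ')'
      · simp [h2]; omega
      · simp [h1, h2]

def flushB (s : List String × List (List Char) × Int) : List String :=
  s.1 ++ (if s.2.1 = [] then [] else [String.ofList (([' '] : List Char).intercalate s.2.1)])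

theorem pvStepB_eq (s : List String × List (List Char) × Int) (tok : List Char) :
    pvStepB s tok
      = (let depth := s.2.2 + (tok.count '(' : Int) - (tok.count ')' : Int);
         let buf := s.2.1 ++ [tok];
         if depth = 0 then (s.1 ++ [String.ofList (([' '] : List Char).intercalate buf)], [], depth)
         else (s.1, buf, depth)) := by
  simp [pvStepB, count_single, PySem.Chars.join]

-- main correspondence: character fold over the interleaved tokens vs token fold
theorem main_fold (ts : List (List Char)) (hne : ts ≠ []) (hsp : ∀ t ∈ ts, ' ' ∉ t) :
    ∀ (out : List String) (buf : List (List Char)) (d : Int),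
    (let r := List.foldl chStep (out, pref buf, d) (([' '] : List Char).intercalate ts);
     r.1 ++ [String.ofList r.2.1])
      = flushB (List.foldl pvStepB (out, buf, d) ts) := by
  induction ts with
  | nil => exact absurd rfl hne
  | cons t ts' ih =>
    intro out buf d
    have hts : ' ' ∉ t := hsp t List.mem_cons_self
    cases ts' with
    | nil =>
      simp only [show ([' '] : List Char).intercalate [t] = t by simp [List.intercalate],
        List.foldl_cons, List.foldl_nil]
      rw [token_fold t hts, pref_append]
      rw [pvStepB_eq]
      simp only []
      split
      · simp [flushB]
      · simp [flushB]
    | cons u us =>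
      have hne' : (u :: us) ≠ ([] : List (List Char)) := by simp
      have hsp' : ∀ x ∈ u :: us, ' ' ∉ x := fun x hx => hsp x (List.mem_cons_of_mem _ hx)
      simp only [inter_cc]
      rw [show t ++ [' '] ++ ([' '] : List Char).intercalate (u :: us)
            = t ++ (' ' :: ([' '] : List Char).intercalate (u :: us)) by simp]
      rw [List.foldl_append, token_fold t hts, List.foldl_cons]
      rw [List.foldl_cons, pvStepB_eq]
      simp only []
      by_cases hd : d + (t.count '(' : Int) - (t.count ')' : Int) = 0
      · rw [if_pos hd]
        rw [show chStep (out, pref buf ++ t, d + (t.count '(' : Int) - (t.count ')' : Int)) ' '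
              = (out ++ [String.ofList (pref buf ++ t)], ([] : List Char),
                 d + (t.count '(' : Int) - (t.count ')' : Int)) by simp [chStep, hd]]
        rw [pref_append]
        have hstep := ih hne' hsp'
          (out ++ [String.ofList (([' '] : List Char).intercalate (buf ++ [t]))]) []
          (d + (t.count '(' : Int) - (t.count ')' : Int))
        rw [show pref ([] : List (List Char)) = [] from rfl] at hstep
        exact hstep
      · rw [if_neg hd]
        rw [show chStep (out, pref buf ++ t, d + (t.count '(' : Int) - (t.count ')' : Int)) ' '
              = (out, (pref buf ++ t) ++ [' '],
                 d + (t.count '(' : Int) - (t.count ')' : Int)) by simp [chStep, hd]]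
        have := ih hne' hsp' out (buf ++ [t]) (d + (t.count '(' : Int) - (t.count ')' : Int))
        rw [show (pref buf ++ t) ++ [' '] = pref (buf ++ [t]) by
          rw [pref_append]; simp [pref]]
        exact this

-- A's enumerated fold with the last-index append, in terms of the plain fold
theorem stepA_fold (n : Int) (l : List Char) (hl : l ≠ []) :
    ∀ (k : Int) (st : List String × List Char × Int), k + (l.length : Int) = n →
    List.foldl (pvStepA n) st (PySem.List.enumerate l k)
      = (let r := List.foldl chStep st l; (r.1 ++ [String.ofList r.2.1], r.2.1, r.2.2)) := by
  induction l with
  | nil => exact absurd rfl hl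
  | cons c rest ih =>
    intro k st hk
    rw [PySem.List.enumerate_cons, List.foldl_cons, List.foldl_cons]
    cases rest with
    | nil =>
      have hkn : k = n - 1 := by simp at hk; omega
      simp only [PySem.List.enumerate_nil, List.foldl_nil]
      rw [show pvStepA n st (k, c) = (let s' := chStep st c;
            (s'.1 ++ [String.ofList s'.2.1], s'.2.1, s'.2.2)) by
        simp [pvStepA, chStep, hkn]]
    | cons u us =>
      have hkn : k ≠ n - 1 := by simp at hk; omega
      rw [show pvStepA n st (k, c) = chStep st c by simp [pvStepA, chStep, hkn]]
      exact ih (by simp) (k + 1) (chStep st c) (by simp at hk ⊢; omega)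

theorem len_eq_toList (s : String) : PySem.Str.len s = (s.toList.length : Int) := by
  simp [PySem.Str.len]

-- ===== VERDICT (by name: the statement is the Claim_ definition above) =====
theorem split_css_selector_spec : Claim_equal_split_css_selector := by
  intro css _
  unfold Spec_split_css_selector split_css_selector split_css_selector_alt
  simp only []
  by_cases hnil : (PySem.Str.strip css).toList = []
  · have h0 : PySem.Str.strip css = "" := String.toList_eq_nil_iff.mp hnil
    simp [h0, PySem.List.enumerate_nil]
  · have hne : PySem.Str.strip css ≠ "" := fun he => hnil (by simp [he])
    rw [if_neg hne]
    rw [stepA_fold (PySem.Str.len (PySem.Str.strip css)) _ hnil 0 ([], [], 0)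
      (by rw [len_eq_toList]; simp)]
    rw [splitOn_eq_split']
    have hmain := main_fold (split' (PySem.Str.strip css).toList) (split'_ne_nil _)
      (split'_no_space _) [] [] 0
    simp only [pref, intercalate_split', flushB] at hmain
    simpa [PySem.Chars.join] using hmain
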